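-- pv_equiv track=rewrite | github.com/AnalyThothAI/hummingbot-api | dashboard/frontend/components/controller_config_generator_page.py | _group_fields
-- ===== SOURCE A (Python) =====
-- from typing import Any, Dict, List, Optional, Tuple
--
-- def _group_fields(field_order: List[str]) -> List[Tuple[str, List[str]]]:
--     core = {
--         "trading_pair",
--         "target_price",
--         "trigger_above",
--         "position_value_quote",
--         "position_width_pct",
--         "ratio_edge_buffer_pct",
--         "ratio_clamp_tick_multiplier",
--         "strategy_type",
--     }
--     budget = {
--         "budget_key",
--         "native_token_symbol",
--         "min_native_balance",
--         "balance_update_timeout_sec",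
--         "balance_refresh_timeout_sec",
--     }
--     groups = {
--         "Core": [],
--         "Rebalance": [],
--         "Exit": [],
--         "Budget/Balance": [],
--         "Other": [],
--     }
--
--     for name in field_order:
--         if name in core or name.startswith("ratio_"):
--             groups["Core"].append(name)
--         elif name.startswith("rebalance_") or name in {"hysteresis_pct", "cooldown_seconds", "max_rebalances_per_hour"}:
--             groups["Rebalance"].append(name)
--         elif name.startswith("stop_loss") or name.startswith("take_profit") or name.startswith("exit_") or name in {"reenter_enabled"}:
--             groups["Exit"].append(name)
--         elif name in budget:
--             groups["Budget/Balance"].append(name)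
--         else:
--             groups["Other"].append(name)
--
--     ordered = []
--     for key in ["Core", "Rebalance", "Exit", "Budget/Balance", "Other"]:
--         if groups[key]:
--             ordered.append((key, groups[key]))
--     return ordered
-- ===== SOURCE B (Python) =====
-- from typing import List, Tuple
--
-- _CORE = {
--     "trading_pair", "target_price", "trigger_above", "position_value_quote",
--     "position_width_pct", "ratio_edge_buffer_pct", "ratio_clamp_tick_multiplier",
--     "strategy_type",
-- }
-- _BUDGET = {
--     "budget_key", "native_token_symbol", "min_native_balance",
--     "balance_update_timeout_sec", "balance_refresh_timeout_sec",
-- }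
--
-- def _classify(name: str) -> str:
--     if name in _CORE or name.startswith("ratio_"):
--         return "Core"
--     if name.startswith("rebalance_") or name in {"hysteresis_pct", "cooldown_seconds", "max_rebalances_per_hour"}:
--         return "Rebalance"
--     if name.startswith("stop_loss") or name.startswith("take_profit") or name.startswith("exit_") or name == "reenter_enabled":
--         return "Exit"
--     if name in _BUDGET:
--         return "Budget/Balance"
--     return "Other"
--
-- def _group_fields(field_order: List[str]) -> List[Tuple[str, List[str]]]:
--     ordered = []
--     for key in ["Core", "Rebalance", "Exit", "Budget/Balance", "Other"]:
--         items = [name for name in field_order if _classify(name) == key]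
--         if items:
--             ordered.append((key, items))
--     return ordered
-- ===== Notes on version B (the rewrite author's own statement) =====
-- stated objective: alternative
-- what changed: Replaced the single distributing pass over a dict of mutable bucket lists by a classify(name) helper plus a transposed traversal: the outer loop runs over the fixed category list and rebuilds each bucket by filtering field_order.
import Mathlib
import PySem

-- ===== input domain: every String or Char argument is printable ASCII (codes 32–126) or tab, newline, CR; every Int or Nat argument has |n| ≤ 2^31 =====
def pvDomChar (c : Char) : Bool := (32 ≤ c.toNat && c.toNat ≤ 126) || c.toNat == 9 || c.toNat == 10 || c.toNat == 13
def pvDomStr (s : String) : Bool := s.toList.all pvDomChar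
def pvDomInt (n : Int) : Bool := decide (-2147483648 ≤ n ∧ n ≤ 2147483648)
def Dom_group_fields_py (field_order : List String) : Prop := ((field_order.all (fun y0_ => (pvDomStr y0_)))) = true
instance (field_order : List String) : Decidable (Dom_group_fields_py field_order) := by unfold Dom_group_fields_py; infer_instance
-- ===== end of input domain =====

-- B replaces A's single distributing pass over a dict of buckets by a classify helper plus a
-- transposed traversal (outer loop over the five categories, each bucket rebuilt by filtering).

-- ===== PORT A =====
def pvCore : PySem.Set String := PySem.Set.ofList
  ["trading_pair", "target_price", "trigger_above", "position_value_quote",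
   "position_width_pct", "ratio_edge_buffer_pct", "ratio_clamp_tick_multiplier",
   "strategy_type"]

def pvBudget : PySem.Set String := PySem.Set.ofList
  ["budget_key", "native_token_symbol", "min_native_balance",
   "balance_update_timeout_sec", "balance_refresh_timeout_sec"]

def pvReb : PySem.Set String := PySem.Set.ofList
  ["hysteresis_pct", "cooldown_seconds", "max_rebalances_per_hour"]

def pvExitSet : PySem.Set String := PySem.Set.ofList ["reenter_enabled"]

def group_fields_py (field_order : List String) : List (String × List String) :=
  let groups : PySem.Dict String (List String) := PySem.Dict.ofList
    [("Core", []), ("Rebalance", []), ("Exit", []), ("Budget/Balance", []), ("Other", [])]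
  let groups := field_order.foldl (fun g name =>
    if pvCore.contains name || PySem.Str.startswith name "ratio_" then
      g.modify "Core" [] (· ++ [name])
    else if PySem.Str.startswith name "rebalance_" || pvReb.contains name then
      g.modify "Rebalance" [] (· ++ [name])
    else if PySem.Str.startswith name "stop_loss" || PySem.Str.startswith name "take_profit"
         || PySem.Str.startswith name "exit_" || pvExitSet.contains name then
      g.modify "Exit" [] (· ++ [name])
    else if pvBudget.contains name then
      g.modify "Budget/Balance" [] (· ++ [name])
    else
      g.modify "Other" [] (· ++ [name])) groups
  let ordered := ["Core", "Rebalance", "Exit", "Budget/Balance", "Other"].foldl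
    (fun acc key => if groups.getD key [] ≠ [] then acc ++ [(key, groups.getD key [])] else acc) []
  ordered

-- ===== PORT B =====
def pvClassify (name : String) : String :=
  if pvCore.contains name || PySem.Str.startswith name "ratio_" then "Core"
  else if PySem.Str.startswith name "rebalance_" || pvReb.contains name then "Rebalance"
  else if PySem.Str.startswith name "stop_loss" || PySem.Str.startswith name "take_profit"
       || PySem.Str.startswith name "exit_" || name == "reenter_enabled" then "Exit"
  else if pvBudget.contains name then "Budget/Balance"
  else "Other"

def group_fields_py_alt (field_order : List String) : List (String × List String) :=
  ["Core", "Rebalance", "Exit", "Budget/Balance", "Other"].foldl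
    (fun ordered key =>
      let items := field_order.filter (fun name => pvClassify name == key)
      if items ≠ [] then ordered ++ [(key, items)] else ordered) []

-- ===== PRECONDITION & SPEC =====
def Spec_group_fields_py (field_order : List String) (out : List (String × List String)) : Prop := out = group_fields_py_alt field_order
instance (field_order : List String) (out : List (String × List String)) : Decidable (Spec_group_fields_py field_order out) := by unfold Spec_group_fields_py; infer_instance

-- ===== CLAIM (what is proved, stated in full; the proofs are below) =====
def Claim_equal_group_fields_py : Prop := ∀ (field_order : List String), Dom_group_fields_py field_order → Spec_group_fields_py field_order (group_fields_py field_order)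

-- ===== LEMMAS AND PROOFS =====

-- A's branching loop body is exactly "append name to the bucket pvClassify name".
lemma stepA_eq_modify_classify (g : PySem.Dict String (List String)) (name : String) :
    (if pvCore.contains name || PySem.Str.startswith name "ratio_" then
      g.modify "Core" [] (· ++ [name])
    else if PySem.Str.startswith name "rebalance_" || pvReb.contains name then
      g.modify "Rebalance" [] (· ++ [name])
    else if PySem.Str.startswith name "stop_loss" || PySem.Str.startswith name "take_profit"
         || PySem.Str.startswith name "exit_" || pvExitSet.contains name then
      g.modify "Exit" [] (· ++ [name])
    else if pvBudget.contains name then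
      g.modify "Budget/Balance" [] (· ++ [name])
    else
      g.modify "Other" [] (· ++ [name]))
    = g.modify (pvClassify name) [] (· ++ [name]) := by
  have h : pvExitSet.contains name = (name == "reenter_enabled") := by
    by_cases hc : name = "reenter_enabled" <;>
      simp [pvExitSet, PySem.Set.ofList, PySem.Set.add, PySem.Set.empty, hc]
  unfold pvClassify
  rw [h]
  split_ifs <;> rfl

-- The bucket at key c after A's loop is the filter of field_order by classify = c.
lemma getD_loopA (field_order : List String) (g : PySem.Dict String (List String)) (c : String) :
    (field_order.foldl (fun g name => g.modify (pvClassify name) [] (· ++ [name])) g).getD c []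
      = g.getD c [] ++ field_order.filter (fun name => pvClassify name == c) := by
  induction field_order generalizing g with
  | nil => simp
  | cons n t ih =>
    simp only [List.foldl_cons, List.filter_cons, ih]
    by_cases h : pvClassify n = c
    · simp [h, PySem.Dict.getD_modify_self]
    · rw [PySem.Dict.getD_modify_of_ne _ _ _ (Ne.symm h)]
      simp [h]

-- Every bucket of the freshly initialised dict is empty.
lemma init_getD (c : String) :
    (PySem.Dict.ofList
      [("Core", ([] : List String)), ("Rebalance", []), ("Exit", []),
       ("Budget/Balance", []), ("Other", [])]).getD c [] = [] := by
  rw [PySem.Dict.getD_eq_get?_getD]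
  have h : (PySem.Dict.ofList
      [("Core", ([] : List String)), ("Rebalance", []), ("Exit", []),
       ("Budget/Balance", []), ("Other", [])])
      = PySem.Dict.mk [("Core", []), ("Rebalance", []), ("Exit", []),
       ("Budget/Balance", []), ("Other", [])] := by decide
  rw [h]
  simp only [PySem.Dict.get?_mk_cons]
  split_ifs <;> rfl

-- ===== VERDICT (by name: the statement is the Claim_ definition above) =====
theorem group_fields_py_spec : Claim_equal_group_fields_py := by
  intro field_order _
  unfold Spec_group_fields_py group_fields_py group_fields_py_alt
  simp only [stepA_eq_modify_classify, List.foldl_cons, List.foldl_nil,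
    getD_loopA, init_getD, List.nil_append]
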